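-- pv_equiv track=rewrite | github.com/Levon-98/generator | Generators.py | pw_guess
-- ===== SOURCE A (Python) =====
-- import string
-- import itertools
--
-- def pw_guess(len_pw: int) -> object:
--     all_char = "".join(
--         [
--             string.ascii_letters,
--             str(string.punctuation.replace(">", "")).replace("<", ""),
--             "0123456789",
--         ]
--     )
--
--     res = itertools.permutations(all_char, len_pw)
--     for guess in res:
--         yield guess
-- ===== SOURCE B (Python) =====
-- import string
--
--
-- def pw_guess(len_pw: int) -> object:
--     all_char = "".join(
--         [
--             string.ascii_letters,
--             str(string.punctuation.replace(">", "")).replace("<", ""),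
--             "0123456789",
--         ]
--     )
--
--     pool = list(all_char)
--     if len_pw > len(pool):
--         return
--     prefixes = [()]
--     for _ in range(len_pw):
--         prefixes = [p + (c,) for p in prefixes for c in pool if c not in p]
--     yield from prefixes
-- ===== Notes on version B (the rewrite author's own statement) =====
-- stated objective: alternative
-- what changed: Replaces the itertools.permutations call by an iterative breadth-first construction: starting from the empty prefix, each of len_pw rounds extends every prefix by every not-yet-used character of the pool (with an early exit when len_pw exceeds the pool size).
import Mathlib
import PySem

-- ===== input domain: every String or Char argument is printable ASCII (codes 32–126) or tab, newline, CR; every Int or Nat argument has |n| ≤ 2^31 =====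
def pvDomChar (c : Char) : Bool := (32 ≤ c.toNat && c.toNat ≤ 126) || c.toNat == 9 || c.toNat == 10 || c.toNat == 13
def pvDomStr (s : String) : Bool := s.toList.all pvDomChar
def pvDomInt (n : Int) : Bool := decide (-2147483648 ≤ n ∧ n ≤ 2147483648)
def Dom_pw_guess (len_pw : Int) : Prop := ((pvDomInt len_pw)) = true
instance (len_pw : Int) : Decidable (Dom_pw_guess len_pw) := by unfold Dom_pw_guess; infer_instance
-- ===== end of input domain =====

-- B replaces A's single itertools.permutations call by an iterative level-by-level construction:
-- starting from the empty prefix, each round extends every prefix by each not-yet-used character.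
-- Equivalence of the return values is proved; A and B are both generators with identical yields.

-- the character pool both Pythons build: ascii_letters ++ punctuation without "<" and ">" ++ digits,
-- as the list of its one-character strings (Python iterates the string's characters)
def pvAllChar : List String :=
  ((PySem.Str.join ""
      ["abcdefghijklmnopqrstuvwxyzABCDEFGHIJKLMNOPQRSTUVWXYZ",
       PySem.Str.replace (PySem.Str.replace "!\"#$%&'()*+,-./:;<=>?@[\\]^_`{|}~" ">" "") "<" "",
       "0123456789"]).toList).map (fun c => String.ofList [c])

-- ===== PORT A =====
def pw_guess (len_pw : Int) : List (List String) :=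
  let all_char := pvAllChar
  -- itertools.permutations(all_char, len_pw); negative len_pw (ValueError) is excluded by Pre_.
  -- itertools.permutations itself short-circuits r > n ("if r > n: return"); that guard is kept
  -- here so the port evaluates as fast as CPython does there (the value is [] either way).
  if (all_char.length : Int) < len_pw then []
  else PySem.List.permutations all_char len_pw.toNat

-- ===== PORT B =====
-- one round of the loop: [p + (c,) for p in prefixes for c in pool if c not in p]
def pvStep (pool : List String) (prefixes : List (List String)) : List (List String) :=
  prefixes.flatMap (fun p => (pool.filter (fun c => !(p.contains c))).map (fun c => p ++ [c]))

-- for _ in range(len_pw): prefixes = pvStep pool prefixes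
def pvGrow (pool : List String) : Nat → List (List String) → List (List String)
  | 0, prefixes => prefixes
  | k+1, prefixes => pvGrow pool k (pvStep pool prefixes)

def pw_guess_alt (len_pw : Int) : List (List String) :=
  let pool := pvAllChar
  if (pool.length : Int) < len_pw then []          -- if len_pw > len(pool): return
  else pvGrow pool len_pw.toNat [[]]

-- ===== PRECONDITION & SPEC =====
-- Pre_ excludes exactly negative len_pw, where A raises ValueError (itertools.permutations with r < 0).
def Pre_pw_guess (len_pw : Int) : Prop := 0 ≤ len_pw
instance (len_pw : Int) : Decidable (Pre_pw_guess len_pw) := by unfold Pre_pw_guess; infer_instance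
def pvWitness_pw_guess : Int := 2

def Spec_pw_guess (len_pw : Int) (out : List (List String)) : Prop := out = pw_guess_alt len_pw
instance (len_pw : Int) (out : List (List String)) : Decidable (Spec_pw_guess len_pw out) := by
  unfold Spec_pw_guess; infer_instance

-- ===== CLAIM (what is proved, stated in full; the proofs are below) =====
def Claim_equal_pw_guess : Prop :=
  ∀ (len_pw : Int), Dom_pw_guess len_pw → Pre_pw_guess len_pw →
    Spec_pw_guess len_pw (pw_guess len_pw)

-- ===== LEMMAS AND PROOFS =====

-- depth-first selection of k distinct elements, the recursion itertools.permutations performs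
def pvDfs : List String → Nat → List (List String)
  | _, 0 => [[]]
  | rem, k+1 => rem.flatMap (fun c => (pvDfs (rem.filter (fun x => x != c)) k).map (fun q => c :: q))

-- all extensions of prefix p by k pairwise-distinct, p-avoiding characters, depth first
def pvExtFrom (pool : List String) : List String → Nat → List (List String)
  | p, 0 => [p]
  | p, k+1 => (pool.filter (fun c => !(p.contains c))).flatMap (fun c => pvExtFrom pool (p ++ [c]) k)

theorem pv_flatMap_range_getD {β : Type} (l : List String) (F : String → List β) :
    (List.range l.length).flatMap (fun i => F (l.getD i "")) = l.flatMap F := by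
  induction l generalizing F with
  | nil => simp
  | cons a l ih =>
      simp only [List.length_cons, List.range_succ_eq_map, List.flatMap_cons, List.flatMap_map]
      simpa using congrArg (fun t => F a ++ t) (ih (fun x => F x))

theorem pv_eraseIdx_eq_filter (l : List String) (i : Nat) (hi : i < l.length)
    (h : l.Nodup) : l.eraseIdx i = l.filter (fun x => x != l[i]) := by
  induction l generalizing i with
  | nil => simp at hi
  | cons a l ih =>
      cases i with
      | zero =>
          simp only [List.eraseIdx_zero, List.tail_cons, List.getElem_cons_zero,
            List.filter_cons]
          have ha : a ∉ l := (List.nodup_cons.mp h).1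
          rw [if_neg (by simp)]
          rw [List.filter_eq_self.mpr]
          intro x hx
          simp only [bne_iff_ne, ne_eq]
          intro hxa; exact ha (hxa ▸ hx)
      | succ i =>
          have hil : i < l.length := by simpa using hi
          have hla : l[i] ∈ l := List.getElem_mem hil
          have ha : a ∉ l := (List.nodup_cons.mp h).1
          simp only [List.eraseIdx_cons_succ, List.getElem_cons_succ, List.filter_cons]
          rw [if_pos (by simp only [bne_iff_ne, ne_eq]; intro hax; exact ha (hax ▸ hla)),
            ih i hil (List.nodup_cons.mp h).2]

theorem pvDfs_eq_permutations (k : Nat) (rem : List String) (h : rem.Nodup) :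
    pvDfs rem k = PySem.List.permutations rem k := by
  induction k generalizing rem with
  | zero => simp [pvDfs, PySem.List.permutations]
  | succ k ih =>
      show pvDfs rem (k+1) = PySem.List.permutations rem (k+1)
      rw [pvDfs, PySem.List.permutations]
      rw [← pv_flatMap_range_getD rem
        (fun c => (pvDfs (rem.filter (fun x => x != c)) k).map (fun q => c :: q))]
      refine List.flatMap_congr (fun i hi => ?_)
      have hil : i < rem.length := List.mem_range.mp hi
      rw [List.getElem?_eq_getElem hil]
      have hgd : rem.getD i "" = rem[i] := List.getD_eq_getElem rem "" hil
      rw [hgd, ← pv_eraseIdx_eq_filter rem i hil h,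
        ih _ (List.Nodup.sublist (List.eraseIdx_sublist rem i) h)]

theorem pvDfs_eq_nil (k : Nat) (rem : List String) (h : rem.length < k) :
    pvDfs rem k = [] := by
  induction k generalizing rem with
  | zero => omega
  | succ k ih =>
      rw [pvDfs]
      refine List.flatMap_eq_nil_iff.mpr (fun c hc => ?_)
      have hlt : (rem.filter (fun x => x != c)).length < rem.length := by
        refine List.length_filter_lt_length_iff_exists.mpr ⟨c, hc, by simp⟩
      rw [ih _ (by omega)]
      simp

theorem pvGrow_eq_flatMap (k : Nat) (pool : List String) (ps : List (List String)) :
    pvGrow pool k ps = ps.flatMap (fun p => pvExtFrom pool p k) := by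
  induction k generalizing ps with
  | zero => simp [pvGrow, pvExtFrom]
  | succ k ih =>
      rw [pvGrow, ih, pvStep, List.flatMap_assoc]
      refine List.flatMap_congr (fun p _ => ?_)
      rw [List.flatMap_map]
      rfl

theorem pvExtFrom_eq_map_dfs (k : Nat) (pool : List String) (p : List String) :
    pvExtFrom pool p k
      = (pvDfs (pool.filter (fun c => !(p.contains c))) k).map (fun q => p ++ q) := by
  induction k generalizing p with
  | zero => simp [pvExtFrom, pvDfs]
  | succ k ih =>
      rw [pvExtFrom, pvDfs, List.map_flatMap]
      refine List.flatMap_congr (fun c _ => ?_)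
      rw [ih (p ++ [c]), List.filter_filter, List.map_map]
      have hfilter : (fun x => !((p ++ [c]).contains x)) = fun x => x != c && !(p.contains x) := by
        funext x
        simp only [List.contains_append, List.contains_cons, Bool.not_or]
        cases hx : p.contains x <;> cases hxc : x == c <;> simp [bne, hxc]
      rw [hfilter]
      simp [Function.comp_def]

theorem pvAllChar_nodup : pvAllChar.Nodup := by decide

theorem pw_guess_eq_dfs (len_pw : Int) :
    pw_guess len_pw = pvDfs pvAllChar len_pw.toNat := by
  rw [pw_guess]
  by_cases hbig : (pvAllChar.length : Int) < len_pw
  · rw [if_pos hbig, pvDfs_eq_nil _ _ (by omega)]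
  · rw [if_neg hbig, pvDfs_eq_permutations _ _ pvAllChar_nodup]

-- ===== VERDICT (by name: the statement is the Claim_ definition above) =====
theorem pw_guess_spec : Claim_equal_pw_guess := by
  intro len_pw _hdom hpre
  unfold Spec_pw_guess
  rw [pw_guess_eq_dfs len_pw, pw_guess_alt]
  by_cases hbig : (pvAllChar.length : Int) < len_pw
  · rw [if_pos hbig, pvDfs_eq_nil _ _ (by omega)]
  · rw [if_neg hbig, pvGrow_eq_flatMap, List.flatMap_cons, List.flatMap_nil,
      List.append_nil, pvExtFrom_eq_map_dfs]
    have : (pvAllChar.filter (fun c => !(([]:List String).contains c))) = pvAllChar := by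
      simp
    rw [this]
    simp
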